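-- pv_equiv track=rewrite | github.com/aadi58002/Linux-Blog-k8s | GenBlogMetaData.py | localFileParsing
-- ===== SOURCE A (Python) =====
-- def localFileParsing(file):
--     count = 0
--     frontmatter=[]
--     for line in file:
--         if line.startswith("---"):
--             count = count + 1
--         elif count == 1 :
--             frontmatter.append(line.strip())
--         if count == 2 :
--             return frontmatter
-- ===== SOURCE B (Python) =====
-- def localFileParsing(file):
--     it = iter(file)
--     for line in it:
--         if line.startswith("---"):
--             break
--     else:
--         return None
--     frontmatter = []
--     for line in it:
--         if line.startswith("---"):
--             return frontmatter
--         frontmatter.append(line.strip())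
--     return None
-- ===== Notes on version B (the rewrite author's own statement) =====
-- stated objective: simpler
-- what changed: Replaces the running delimiter counter and per-line if/elif/if dispatch by two sequential phases over one iterator: skip to the first '---', then collect stripped lines until the second '---'.
import Mathlib
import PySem

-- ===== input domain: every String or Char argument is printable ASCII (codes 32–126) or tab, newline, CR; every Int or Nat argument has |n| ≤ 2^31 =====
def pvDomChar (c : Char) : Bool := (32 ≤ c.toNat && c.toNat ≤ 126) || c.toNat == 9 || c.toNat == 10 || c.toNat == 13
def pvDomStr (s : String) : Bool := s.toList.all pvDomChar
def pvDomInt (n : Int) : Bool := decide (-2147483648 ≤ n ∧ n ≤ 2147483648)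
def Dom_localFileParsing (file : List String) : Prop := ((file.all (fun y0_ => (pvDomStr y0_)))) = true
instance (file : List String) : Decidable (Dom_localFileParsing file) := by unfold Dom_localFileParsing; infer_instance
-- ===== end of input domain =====

-- B replaces A's running counter + if/elif dispatch by two sequential phases over the same list; equivalence proved on all inputs (both are total).
-- ===== PORT A =====
-- loop state: count, frontmatter; branch order as in A (count'' computed by the first if, elif uses the old count, then the count==2 check)
def pvGoA (ls : List String) (count : Int) (fm : List String) : Option (List String) :=
  match ls with
  | [] => none
  | line :: rest =>
    let count' := if PySem.Str.startswith line "---" then count + 1 else count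
    let fm' := if PySem.Str.startswith line "---" then fm
               else if count = 1 then fm ++ [PySem.Str.strip line] else fm
    if count' = 2 then some fm' else pvGoA rest count' fm'

def localFileParsing (file : List String) : Option (List String) :=
  pvGoA file 0 []

-- ===== PORT B =====
-- phase two: collect stripped lines until the second '---' (returns the collected list), none if the iterator ends
def pvPhase2 (ls : List String) (fm : List String) : Option (List String) :=
  match ls with
  | [] => none
  | line :: rest =>
    if PySem.Str.startswith line "---" then some fm
    else pvPhase2 rest (fm ++ [PySem.Str.strip line])

-- phase one: skip to the first '---' (for…else: none if never found), then hand the rest to phase two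
def pvPhase1 (ls : List String) : Option (List String) :=
  match ls with
  | [] => none
  | line :: rest =>
    if PySem.Str.startswith line "---" then pvPhase2 rest []
    else pvPhase1 rest

def localFileParsing_alt (file : List String) : Option (List String) :=
  pvPhase1 file

-- ===== PRECONDITION & SPEC =====
def Spec_localFileParsing (file : List String) (out : Option (List String)) : Prop := out = localFileParsing_alt file
instance (file : List String) (out : Option (List String)) : Decidable (Spec_localFileParsing file out) := by unfold Spec_localFileParsing; infer_instance

-- ===== CLAIM (what is proved, stated in full; the proofs are below) =====
def Claim_equal_localFileParsing : Prop := ∀ (file : List String), Dom_localFileParsing file → Spec_localFileParsing file (localFileParsing file)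

-- ===== LEMMAS AND PROOFS =====

-- inside the frontmatter (count = 1), A's loop is exactly phase two
lemma pvGoA_one (ls fm : List String) : pvGoA ls 1 fm = pvPhase2 ls fm := by
  induction ls generalizing fm with
  | nil => rfl
  | cons line rest ih =>
    simp only [pvGoA, pvPhase2, PySem.Str.startswith_eq]
    by_cases h : PySem.Chars.startswith line.toList ['-', '-', '-'] = true <;>
      simp [h, ih]

-- before the first delimiter (count = 0), A's loop is exactly phase one
lemma pvGoA_zero (ls : List String) : pvGoA ls 0 [] = pvPhase1 ls := by
  induction ls with
  | nil => rfl
  | cons line rest ih =>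
    simp only [pvGoA, pvPhase1, PySem.Str.startswith_eq]
    by_cases h : PySem.Chars.startswith line.toList ['-', '-', '-'] = true <;>
      simp [h, ih, pvGoA_one]

-- ===== VERDICT (by name: the statement is the Claim_ definition above) =====
theorem localFileParsing_spec : Claim_equal_localFileParsing := by
  intro file _
  unfold Spec_localFileParsing localFileParsing localFileParsing_alt
  exact pvGoA_zero file
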